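-- pv_equiv track=rewrite | github.com/sunzehui/- | PythonCode/algorithm/尺取法-hiho字符串.py | checkArr
-- ===== SOURCE A (Python) =====
-- def checkArr(arr, i, j):
--     x, y, z = 0, 0, 0
--     for i in range(i, j+1):
--         if arr[i] == 'h':
--             x += 1
--         elif arr[i] == "i":
--             y += 1
--         elif arr[i] == "o":
--             z += 1
--     return x >= 2 and y >= 1 and z >= 1
-- ===== SOURCE B (Python) =====
-- def checkArr(arr, i, j):
--     ks = range(i, j + 1)
--     h = sum(arr[k] == 'h' for k in ks)
--     i_ = sum(arr[k] == 'i' for k in ks)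
--     o = sum(arr[k] == 'o' for k in ks)
--     return h >= 2 and i_ >= 1 and o >= 1
-- ===== Notes on version B (the rewrite author's own statement) =====
-- stated objective: alternative
-- what changed: A's single pass with a branching elif accumulator (x,y,z) is replaced by three independent counting passes over the same index range, one per letter, combined at the end.
import Mathlib
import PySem

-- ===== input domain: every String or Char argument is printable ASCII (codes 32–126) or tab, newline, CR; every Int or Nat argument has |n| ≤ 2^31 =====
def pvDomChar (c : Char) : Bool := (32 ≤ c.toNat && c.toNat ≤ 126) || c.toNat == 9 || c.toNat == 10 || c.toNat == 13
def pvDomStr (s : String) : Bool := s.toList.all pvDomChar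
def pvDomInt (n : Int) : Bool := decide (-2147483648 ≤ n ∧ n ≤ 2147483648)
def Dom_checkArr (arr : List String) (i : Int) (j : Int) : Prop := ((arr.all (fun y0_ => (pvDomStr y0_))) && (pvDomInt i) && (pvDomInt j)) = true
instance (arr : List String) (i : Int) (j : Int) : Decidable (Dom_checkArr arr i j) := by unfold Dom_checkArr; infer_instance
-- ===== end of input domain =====

-- B replaces A's single branching pass with three independent per-letter counting passes over the same index range (alternative decomposition, same cost).

-- ===== PORT A =====
def checkArrLoopA (arr : List String) : List Int → (Int × Int × Int) → Option (Int × Int × Int)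
  | [], s => some s
  | k :: ks, (x, y, z) =>
    match PySem.List.pyGet? arr k with
    | none => none
    | some v =>
      checkArrLoopA arr ks
        (if v == "h" then (x + 1, y, z)
         else if v == "i" then (x, y + 1, z)
         else if v == "o" then (x, y, z + 1)
         else (x, y, z))

def checkArr (arr : List String) (i : Int) (j : Int) : Bool :=
  match checkArrLoopA arr (PySem.List.pyRange i (j + 1) 1) (0, 0, 0) with
  | none => false  -- IndexError: excluded by Pre_checkArr
  | some (x, y, z) => decide (x ≥ 2) && (decide (y ≥ 1) && decide (z ≥ 1))

-- ===== PORT B =====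
-- sum(arr[k] == c for k in ks): one counting pass per letter; none = IndexError
def sumEqB (arr : List String) (c : String) : List Int → Int → Option Int
  | [], acc => some acc
  | k :: ks, acc =>
    match PySem.List.pyGet? arr k with
    | none => none
    | some v => sumEqB arr c ks (acc + (if v == c then 1 else 0))

def checkArr_alt (arr : List String) (i : Int) (j : Int) : Bool :=
  let ks := PySem.List.pyRange i (j + 1) 1
  match sumEqB arr "h" ks 0, sumEqB arr "i" ks 0, sumEqB arr "o" ks 0 with
  | some h, some i_, some o => decide (h ≥ 2) && (decide (i_ ≥ 1) && decide (o ≥ 1))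
  | _, _, _ => false  -- IndexError: excluded by Pre_checkArr

-- ===== PRECONDITION & SPEC =====
-- Pre_: exactly the inputs where Python A returns (no IndexError): every index in range(i, j+1) is in range.
def Pre_checkArr (arr : List String) (i : Int) (j : Int) : Prop :=
  i ≤ j → (-(arr.length : Int) ≤ i ∧ j < (arr.length : Int))
instance (arr : List String) (i : Int) (j : Int) : Decidable (Pre_checkArr arr i j) := by
  unfold Pre_checkArr; infer_instance
def pvWitness_checkArr : List String × Int × Int := (["h", "h", "i", "o"], 0, 3)
def Spec_checkArr (arr : List String) (i : Int) (j : Int) (out : Bool) : Prop := out = checkArr_alt arr i j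
instance (arr : List String) (i : Int) (j : Int) (out : Bool) : Decidable (Spec_checkArr arr i j out) := by unfold Spec_checkArr; infer_instance

-- ===== CLAIM (what is proved, stated in full; the proofs are below) =====
def Claim_equal_checkArr : Prop := ∀ (arr : List String) (i : Int) (j : Int), Dom_checkArr arr i j → Pre_checkArr arr i j → Spec_checkArr arr i j (checkArr arr i j)

-- ===== LEMMAS AND PROOFS =====
lemma loop_eq_sums (arr : List String) (ks : List Int) :
    ∀ x y z : Int,
      checkArrLoopA arr ks (x, y, z) =
        match sumEqB arr "h" ks x, sumEqB arr "i" ks y, sumEqB arr "o" ks z with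
        | some a, some b, some c => some (a, b, c)
        | _, _, _ => none := by
  induction ks with
  | nil => intro x y z; simp [checkArrLoopA, sumEqB]
  | cons k ks ih =>
    intro x y z
    simp only [checkArrLoopA, sumEqB]
    cases PySem.List.pyGet? arr k with
    | none => rfl
    | some v =>
      by_cases hh : v = "h"
      · subst hh; simpa using ih (x + 1) y z
      · by_cases hi : v = "i"
        · subst hi; simpa using ih x (y + 1) z
        · by_cases ho : v = "o"
          · subst ho; simpa [hh, hi] using ih x y (z + 1)
          · simpa [hh, hi, ho] using ih x y z

-- ===== VERDICT (by name: the statement is the Claim_ definition above) =====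
theorem checkArr_spec : Claim_equal_checkArr := by
  intro arr i j _ _
  simp only [Spec_checkArr, checkArr, checkArr_alt]
  rw [loop_eq_sums]
  cases sumEqB arr "h" (PySem.List.pyRange i (j + 1) 1) 0 <;>
    cases sumEqB arr "i" (PySem.List.pyRange i (j + 1) 1) 0 <;>
      cases sumEqB arr "o" (PySem.List.pyRange i (j + 1) 1) 0 <;> rfl
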